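-- pv_equiv track=rewrite | github.com/kendallm/advent-of-code | 2022/solutions/day8.py | build_sight_lines
-- ===== SOURCE A (Python) =====
-- from collections import defaultdict
--
-- def build_sight_lines(lines: list[str]):
--     sight_lines = defaultdict(list)
--     width = len(lines)
--     length = len(lines[0])
--     for x in range(width):
--         for y in range(length):
--             coord = (x, y, lines[x][y])
--             for z in range(length):
--                 spot = (x, z, lines[x][z])
--                 if spot != coord:
--                     sight_lines[coord].append(spot)
--             for z in range(width):
--                 spot = (z, y, lines[z][y])
--                 if spot != coord:
--                     sight_lines[coord].append(spot)
--     return sight_lines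
-- ===== SOURCE B (Python) =====
-- from collections import defaultdict
--
-- def build_sight_lines(lines: list[str]):
--     width = len(lines)
--     length = len(lines[0])
--     rows = [[(x, z, lines[x][z]) for z in range(length)] for x in range(width)]
--     cols = [[(z, y, lines[z][y]) for z in range(width)] for y in range(length)]
--     sight_lines = defaultdict(list)
--     for x in range(width):
--         row = rows[x]
--         for y in range(length):
--             col = cols[y]
--             neighbors = row[:y] + row[y + 1:] + col[:x] + col[x + 1:]
--             if neighbors:
--                 sight_lines[(x, y, lines[x][y])] = neighbors
--     return sight_lines
-- ===== Notes on version B (the rewrite author's own statement) =====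
-- stated objective: alternative
-- what changed: B precomputes the row and column tuple tables once and forms each cell's sight-line list by slicing the cell itself out of its row and column, instead of A's per-cell rescans of the row and column with an inequality test on every element; empty lists are never created, matching A's defaultdict which only materialises keys on append.
import Mathlib
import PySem

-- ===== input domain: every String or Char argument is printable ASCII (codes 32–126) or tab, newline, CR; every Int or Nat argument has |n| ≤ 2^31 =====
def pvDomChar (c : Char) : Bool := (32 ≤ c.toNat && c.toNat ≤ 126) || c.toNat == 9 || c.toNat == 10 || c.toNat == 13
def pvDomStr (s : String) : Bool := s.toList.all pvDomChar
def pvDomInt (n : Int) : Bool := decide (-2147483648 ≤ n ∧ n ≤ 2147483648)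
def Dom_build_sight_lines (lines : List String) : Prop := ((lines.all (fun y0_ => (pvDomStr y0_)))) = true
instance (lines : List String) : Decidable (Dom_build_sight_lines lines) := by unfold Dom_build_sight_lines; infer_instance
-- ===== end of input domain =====

-- B precomputes the row and column tuple lists once and takes each cell's sight lines by slicing
-- out the cell itself, instead of A's per-cell rescans with an inequality test (objective: alternative decomposition).

-- shared indexing helpers: lines[i][j] as the 1-character string Python yields, and len(lines[0])
def pvCell (lines : List String) (i j : Int) : String :=
  match PySem.List.pyGet? lines i with
  | some s =>
    match PySem.Str.pyGet? s j with
    | some c => String.ofList [c]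
    | none => ""
  | none => ""

def pvLen0 (lines : List String) : Int :=
  match PySem.List.pyGet? lines 0 with
  | some s => PySem.Str.len s
  | none => 0

-- ===== PORT A =====
def build_sight_lines (lines : List String) : List (Int × Int × String × List (Int × Int × String)) :=
  let width : Int := (lines.length : Int)
  let length : Int := pvLen0 lines
  let d : PySem.Dict (Int × Int × String) (List (Int × Int × String)) :=
    (PySem.List.pyRange 0 width 1).foldl (fun d x =>
      (PySem.List.pyRange 0 length 1).foldl (fun d y =>
        let coord : Int × Int × String := (x, y, pvCell lines x y)
        let d :=
          (PySem.List.pyRange 0 length 1).foldl (fun d z =>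
            let spot : Int × Int × String := (x, z, pvCell lines x z)
            if spot ≠ coord then d.modify coord [] (· ++ [spot]) else d) d
        (PySem.List.pyRange 0 width 1).foldl (fun d z =>
          let spot : Int × Int × String := (z, y, pvCell lines z y)
          if spot ≠ coord then d.modify coord [] (· ++ [spot]) else d) d) d)
      PySem.Dict.empty
  d.items.map (fun kv => (kv.1.1, kv.1.2.1, kv.1.2.2, kv.2))

-- ===== PORT B =====
def build_sight_lines_alt (lines : List String) : List (Int × Int × String × List (Int × Int × String)) :=
  let width : Int := (lines.length : Int)
  let length : Int := pvLen0 lines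
  let rows : List (List (Int × Int × String)) :=
    (PySem.List.pyRange 0 width 1).map (fun x =>
      (PySem.List.pyRange 0 length 1).map (fun z => (x, z, pvCell lines x z)))
  let cols : List (List (Int × Int × String)) :=
    (PySem.List.pyRange 0 length 1).map (fun y =>
      (PySem.List.pyRange 0 width 1).map (fun z => (z, y, pvCell lines z y)))
  let d : PySem.Dict (Int × Int × String) (List (Int × Int × String)) :=
    (PySem.List.pyRange 0 width 1).foldl (fun d x =>
      let row := PySem.List.pyGetD rows x []
      (PySem.List.pyRange 0 length 1).foldl (fun d y =>
        let col := PySem.List.pyGetD cols y []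
        let neighbors :=
          PySem.List.slice row none (some y) ++ PySem.List.slice row (some (y + 1)) none ++
            PySem.List.slice col none (some x) ++ PySem.List.slice col (some (x + 1)) none
        if neighbors ≠ [] then d.insert (x, y, pvCell lines x y) neighbors else d) d)
      PySem.Dict.empty
  d.items.map (fun kv => (kv.1.1, kv.1.2.1, kv.1.2.2, kv.2))

-- ===== PRECONDITION & SPEC =====
-- Pre_ excludes exactly the inputs where Python A raises IndexError: an empty list
-- (lines[0]) or a line shorter than the first one (lines[x][y]).
def Pre_build_sight_lines (lines : List String) : Prop :=
  lines ≠ [] ∧ ∀ s ∈ lines, pvLen0 lines ≤ PySem.Str.len s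
instance (lines : List String) : Decidable (Pre_build_sight_lines lines) := by
  unfold Pre_build_sight_lines; infer_instance

def pvWitness_build_sight_lines : List String := ["ab", "cd"]

def Spec_build_sight_lines (lines : List String) (out : List (Int × Int × String × List (Int × Int × String))) : Prop := out = build_sight_lines_alt lines
instance (lines : List String) (out : List (Int × Int × String × List (Int × Int × String))) : Decidable (Spec_build_sight_lines lines out) := by
  unfold Spec_build_sight_lines
  have h1 : DecidableEq (Int × String × List (Int × Int × String)) := inferInstance
  exact @List.hasDecEq _ (fun x y => @instDecidableEqProd _ _ _ h1 x y) out (build_sight_lines_alt lines)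

-- ===== CLAIM (what is proved, stated in full; the proofs are below) =====
def Claim_equal_build_sight_lines : Prop := ∀ (lines : List String), Dom_build_sight_lines lines → Pre_build_sight_lines lines → Spec_build_sight_lines lines (build_sight_lines lines)

-- ===== LEMMAS AND PROOFS =====
-- (the two ports are in fact equal on ALL inputs; Pre_ only marks where Python A raises)

abbrev pvK : Type := Int × Int × String
abbrev pvD : Type := PySem.Dict pvK (List pvK)

-- A's defaultdict append step for a fixed key k
def pvApp (k : pvK) (d : pvD) (s : pvK) : pvD :=
  if s ≠ k then d.modify k [] (· ++ [s]) else d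

def pvRowS (lines : List String) (x : Int) : List pvK :=
  (PySem.List.pyRange 0 (pvLen0 lines) 1).map (fun z => (x, z, pvCell lines x z))
def pvColS (lines : List String) (y : Int) : List pvK :=
  (PySem.List.pyRange 0 (lines.length : Int) 1).map (fun z => (z, y, pvCell lines z y))
def pvKey (lines : List String) (p : Int × Int) : pvK := (p.1, p.2, pvCell lines p.1 p.2)
def pvPairs (lines : List String) : List (Int × Int) :=
  (PySem.List.pyRange 0 (lines.length : Int) 1) ×ˢ (PySem.List.pyRange 0 (pvLen0 lines) 1)
def pvSel (lines : List String) (p : Int × Int) : List pvK :=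
  (pvRowS lines p.1 ++ pvColS lines p.2).filter (fun s => !decide (s = pvKey lines p))
def pvRows (lines : List String) : List (List pvK) :=
  (PySem.List.pyRange 0 (lines.length : Int) 1).map (fun x => pvRowS lines x)
def pvCols (lines : List String) : List (List pvK) :=
  (PySem.List.pyRange 0 (pvLen0 lines) 1).map (fun y => pvColS lines y)
def pvNbRaw (lines : List String) (p : Int × Int) : List pvK :=
  PySem.List.slice (PySem.List.pyGetD (pvRows lines) p.1 []) none (some p.2) ++
    PySem.List.slice (PySem.List.pyGetD (pvRows lines) p.1 []) (some (p.2 + 1)) none ++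
    PySem.List.slice (PySem.List.pyGetD (pvCols lines) p.2 []) none (some p.1) ++
    PySem.List.slice (PySem.List.pyGetD (pvCols lines) p.2 []) (some (p.1 + 1)) none
def pvFlat (kv : pvK × List pvK) : Int × Int × String × List pvK :=
  (kv.1.1, kv.1.2.1, kv.1.2.2, kv.2)
def pvCanon (lines : List String) : List (pvK × List pvK) :=
  (pvPairs lines).filterMap (fun p =>
    if pvSel lines p = [] then none else some (pvKey lines p, pvSel lines p))

lemma pvModify_eq (d : pvD) (k : pvK) (dflt : List pvK) (f : List pvK → List pvK) :
    d.modify k dflt f = d.insert k (f (d.getD k dflt)) := rfl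

lemma pvApp_foldl_insert (k : pvK) : ∀ (ss : List pvK) (d : pvD) (v : List pvK),
    ss.foldl (pvApp k) (d.insert k v) = d.insert k (v ++ ss.filter (fun s => !decide (s = k))) := by
  intro ss
  induction ss with
  | nil => intro d v; simp
  | cons s t ih =>
    intro d v
    by_cases hs : s = k
    · subst hs
      simpa [pvApp, List.filter_cons] using ih d v
    · have hmod : pvApp k (d.insert k v) s = d.insert k (v ++ [s]) := by
        rw [pvApp, if_pos hs, pvModify_eq, PySem.Dict.getD_insert_self,
          PySem.Dict.insert_insert_self]
      rw [List.foldl_cons, hmod, ih d (v ++ [s])]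
      simp [hs]

lemma pvApp_foldl_fresh (k : pvK) : ∀ (ss : List pvK) (d : pvD), d.contains k = false →
    ss.foldl (pvApp k) d =
      if ss.filter (fun s => !decide (s = k)) = [] then d
      else d.insert k (ss.filter (fun s => !decide (s = k))) := by
  intro ss
  induction ss with
  | nil => intro d h; simp
  | cons s t ih =>
    intro d h
    by_cases hs : s = k
    · subst hs
      rw [List.foldl_cons]
      have h1 : pvApp s d s = d := by simp [pvApp]
      have h2 : List.filter (fun u => !decide (u = s)) (s :: t)
          = List.filter (fun u => !decide (u = s)) t := by simp
      rw [h1, h2]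
      exact ih d h
    · have hmod : pvApp k d s = d.insert k [s] := by
        rw [pvApp, if_pos hs, pvModify_eq, PySem.Dict.getD_of_not_contains d _ h]; rfl
      rw [List.foldl_cons, hmod, pvApp_foldl_insert k t d [s]]
      simp [hs]

lemma pvDictA {α : Type} (key : α → pvK) (ss : α → List pvK) : ∀ (ps : List α) (d : pvD),
    (∀ p ∈ ps, d.contains (key p) = false) → (ps.map key).Nodup →
    (ps.foldl (fun d p => (ss p).foldl (pvApp (key p)) d) d).items
      = d.items ++ ps.filterMap (fun p =>
          if (ss p).filter (fun s => !decide (s = key p)) = [] then none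
          else some (key p, (ss p).filter (fun s => !decide (s = key p)))) := by
  intro ps
  induction ps with
  | nil => intro d _ _; simp
  | cons p t ih =>
    intro d hf hnd
    rw [List.foldl_cons, pvApp_foldl_fresh (key p) (ss p) d (hf p (List.mem_cons_self ..))]
    rw [List.map_cons, List.nodup_cons] at hnd
    rw [List.filterMap_cons]
    by_cases he : (ss p).filter (fun s => !decide (s = key p)) = []
    · rw [if_pos he, if_pos he, ih d (fun q hq => hf q (List.mem_cons_of_mem _ hq)) hnd.2]
    · rw [if_neg he, if_neg he]
      have hfresh : ∀ q ∈ t,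
          (d.insert (key p) ((ss p).filter (fun s => !decide (s = key p)))).contains (key q) = false := by
        intro q hq
        have hne : key q ≠ key p := by
          intro hmap
          exact hnd.1 (hmap ▸ List.mem_map_of_mem hq)
        rw [PySem.Dict.contains_insert]
        simp [hne, hf q (List.mem_cons_of_mem _ hq)]
      rw [ih _ hfresh hnd.2,
        PySem.Dict.items_insert_of_not_contains d _ (hf p (List.mem_cons_self ..))]
      simp

lemma pvDictB {α : Type} (key : α → pvK) (nb : α → List pvK) : ∀ (ps : List α) (d : pvD),
    (∀ p ∈ ps, d.contains (key p) = false) → (ps.map key).Nodup →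
    (ps.foldl (fun d p => if nb p ≠ [] then d.insert (key p) (nb p) else d) d).items
      = d.items ++ ps.filterMap (fun p => if nb p = [] then none else some (key p, nb p)) := by
  intro ps
  induction ps with
  | nil => intro d _ _; simp
  | cons p t ih =>
    intro d hf hnd
    rw [List.foldl_cons]
    rw [List.map_cons, List.nodup_cons] at hnd
    rw [List.filterMap_cons]
    by_cases he : nb p = []
    · rw [if_neg (by simp [he]), if_pos he,
        ih d (fun q hq => hf q (List.mem_cons_of_mem _ hq)) hnd.2]
    · rw [if_pos he, if_neg he]
      have hfresh : ∀ q ∈ t, ((d.insert (key p) (nb p))).contains (key q) = false := by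
        intro q hq
        have hne : key q ≠ key p := by
          intro hmap
          exact hnd.1 (hmap ▸ List.mem_map_of_mem hq)
        rw [PySem.Dict.contains_insert]
        simp [hne, hf q (List.mem_cons_of_mem _ hq)]
      rw [ih _ hfresh hnd.2,
        PySem.Dict.items_insert_of_not_contains d _ (hf p (List.mem_cons_self ..))]
      simp

lemma pvFoldlProduct {α β γ : Type} (l₁ : List α) (l₂ : List β) (f : γ → α × β → γ) (i : γ) :
    l₁.foldl (fun a x => l₂.foldl (fun a y => f a (x, y)) a) i = (l₁ ×ˢ l₂).foldl f i := by
  induction l₁ generalizing i with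
  | nil => rfl
  | cons x t ih =>
    rw [List.foldl_cons, ih]
    show _ = ((x :: t) ×ˢ l₂).foldl f i
    rw [List.product_cons, List.foldl_append, List.foldl_map]

lemma pvFilterNeGetElem {α : Type} [DecidableEq α] : ∀ (l : List α) (y : Nat) (hy : y < l.length),
    (∀ i (hi : i < l.length), l[i] = l[y] ↔ i = y) →
    l.filter (fun s => !decide (s = l[y])) = l.take y ++ l.drop (y + 1) := by
  intro l
  induction l with
  | nil => intro y hy _; simp at hy
  | cons a t ih =>
    intro y hy hinj
    cases y with
    | zero =>
      simp only [List.getElem_cons_zero, List.take_zero, List.drop_succ_cons,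
        List.drop_zero, List.nil_append, List.filter_cons, decide_true, Bool.not_true,
        if_false, Bool.false_eq_true]
      apply List.filter_eq_self.mpr
      intro s hs
      obtain ⟨i, hi, rfl⟩ := List.mem_iff_getElem.mp hs
      have h2 := hinj (i + 1) (by simpa using Nat.succ_lt_succ hi)
      simp only [List.getElem_cons_succ, List.getElem_cons_zero] at h2
      simp only [Bool.not_eq_true', decide_eq_false_iff_not]
      intro hc
      exact absurd (h2.mp hc) (by omega)
    | succ y' =>
      have hyt : y' < t.length := by simpa using hy
      have hinj' : ∀ i (hi : i < t.length), t[i] = t[y'] ↔ i = y' := by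
        intro i hi
        have h := hinj (i + 1) (by simpa using Nat.succ_lt_succ hi)
        simp only [List.getElem_cons_succ] at h
        constructor
        · intro hc; have := h.mp hc; omega
        · intro hc; exact h.mpr (by omega)
      have ha : a ≠ t[y'] := by
        have h0 := hinj 0 (by simp)
        simp only [List.getElem_cons_zero, List.getElem_cons_succ] at h0
        intro hc; exact absurd (h0.mp hc) (by omega)
      simp only [List.getElem_cons_succ, List.filter_cons, List.take_succ_cons,
        List.drop_succ_cons]
      rw [if_pos (by simpa using ha)]
      exact congrArg (fun l => a :: l) (ih y' hyt hinj')

lemma pvCellStep (lines : List String) (x y : Int) (d : pvD) :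
    (PySem.List.pyRange 0 (lines.length : Int) 1).foldl
      (fun d z =>
        if (z, y, pvCell lines z y) ≠ (x, y, pvCell lines x y) then
          d.modify (x, y, pvCell lines x y) [] (· ++ [(z, y, pvCell lines z y)])
        else d)
      ((PySem.List.pyRange 0 (pvLen0 lines) 1).foldl
        (fun d z =>
          if (x, z, pvCell lines x z) ≠ (x, y, pvCell lines x y) then
            d.modify (x, y, pvCell lines x y) [] (· ++ [(x, z, pvCell lines x z)])
          else d) d)
      = (pvRowS lines x ++ pvColS lines y).foldl (pvApp (x, y, pvCell lines x y)) d := by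
  rw [List.foldl_append]
  unfold pvRowS pvColS
  rw [List.foldl_map, List.foldl_map]
  rfl

lemma pvRowFilter (lines : List String) (x y : Int) (hy0 : 0 ≤ y) (hyL : y < pvLen0 lines) :
    (pvRowS lines x).filter (fun s => !decide (s = (x, y, pvCell lines x y)))
      = PySem.List.slice (pvRowS lines x) none (some y) ++
        PySem.List.slice (pvRowS lines x) (some (y + 1)) none := by
  rw [PySem.List.slice_to _ hy0, PySem.List.slice_from _ (by omega : (0:Int) ≤ y + 1)]
  have h1 : (y + 1).toNat = y.toNat + 1 := by omega
  rw [h1]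
  have hlen : (pvRowS lines x).length = (pvLen0 lines - 0).toNat := by
    unfold pvRowS; rw [PySem.List.pyRange_one]; simp
  have hyn : y.toNat < (pvRowS lines x).length := by rw [hlen]; omega
  have hget : (pvRowS lines x)[y.toNat]'hyn = (x, y, pvCell lines x y) := by
    unfold pvRowS
    simp only [PySem.List.pyRange_one, List.map_map, List.getElem_map, List.getElem_range,
      Function.comp_apply, zero_add]
    rw [Int.toNat_of_nonneg hy0]
  have hinj : ∀ i (hi : i < (pvRowS lines x).length),
      (pvRowS lines x)[i] = (pvRowS lines x)[y.toNat]'hyn ↔ i = y.toNat := by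
    intro i hi
    unfold pvRowS
    simp only [PySem.List.pyRange_one, List.map_map, List.getElem_map, List.getElem_range,
      Function.comp_apply, zero_add]
    constructor
    · intro h
      have h2 := congrArg (fun t : pvK => t.2.1) h
      simp only at h2
      omega
    · intro h; subst h; rfl
  rw [← hget]
  exact pvFilterNeGetElem (pvRowS lines x) y.toNat hyn hinj

lemma pvColFilter (lines : List String) (x y : Int) (hx0 : 0 ≤ x) (hxW : x < (lines.length : Int)) :
    (pvColS lines y).filter (fun s => !decide (s = (x, y, pvCell lines x y)))
      = PySem.List.slice (pvColS lines y) none (some x) ++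
        PySem.List.slice (pvColS lines y) (some (x + 1)) none := by
  rw [PySem.List.slice_to _ hx0, PySem.List.slice_from _ (by omega : (0:Int) ≤ x + 1)]
  have h1 : (x + 1).toNat = x.toNat + 1 := by omega
  rw [h1]
  have hlen : (pvColS lines y).length = ((lines.length : Int) - 0).toNat := by
    unfold pvColS; rw [PySem.List.pyRange_one]; simp
  have hxn : x.toNat < (pvColS lines y).length := by rw [hlen]; omega
  have hget : (pvColS lines y)[x.toNat]'hxn = (x, y, pvCell lines x y) := by
    unfold pvColS
    simp only [PySem.List.pyRange_one, List.map_map, List.getElem_map, List.getElem_range,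
      Function.comp_apply, zero_add]
    rw [Int.toNat_of_nonneg hx0]
  have hinj : ∀ i (hi : i < (pvColS lines y).length),
      (pvColS lines y)[i] = (pvColS lines y)[x.toNat]'hxn ↔ i = x.toNat := by
    intro i hi
    unfold pvColS
    simp only [PySem.List.pyRange_one, List.map_map, List.getElem_map, List.getElem_range,
      Function.comp_apply, zero_add]
    constructor
    · intro h
      have h2 := congrArg (fun t : pvK => t.1) h
      simp only at h2
      omega
    · intro h; subst h; rfl
  rw [← hget]
  exact pvFilterNeGetElem (pvColS lines y) x.toNat hxn hinj

lemma pvPairsMem (lines : List String) {x y : Int} (h : (x, y) ∈ pvPairs lines) :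
    (0 ≤ x ∧ x < (lines.length : Int)) ∧ (0 ≤ y ∧ y < pvLen0 lines) := by
  unfold pvPairs at h
  simp only [List.mem_product] at h
  exact ⟨PySem.List.mem_pyRange_one.mp h.1, PySem.List.mem_pyRange_one.mp h.2⟩

lemma pvSelEqNbRaw (lines : List String) (p : Int × Int) (hp : p ∈ pvPairs lines) :
    pvSel lines p = pvNbRaw lines p := by
  obtain ⟨x, y⟩ := p
  obtain ⟨⟨hx0, hxW⟩, hy0, hyL⟩ := pvPairsMem lines hp
  have hrow : PySem.List.pyGetD (pvRows lines) x [] = pvRowS lines x := by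
    unfold pvRows
    exact PySem.List.pyGetD_map_pyRange_of_nonneg _ _ _ _ hx0 hxW
  have hcol : PySem.List.pyGetD (pvCols lines) y [] = pvColS lines y := by
    unfold pvCols
    exact PySem.List.pyGetD_map_pyRange_of_nonneg _ _ _ _ hy0 hyL
  unfold pvSel pvNbRaw pvKey
  dsimp only
  rw [hrow, hcol, List.filter_append, pvRowFilter lines x y hy0 hyL,
    pvColFilter lines x y hx0 hxW]
  simp [List.append_assoc]

lemma pvKeysNodup (lines : List String) : ((pvPairs lines).map (pvKey lines)).Nodup := by
  have hinj : Function.Injective (pvKey lines) := by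
    intro p q h
    simp only [pvKey, Prod.mk.injEq] at h
    exact Prod.ext h.1 h.2.1
  exact ((PySem.List.nodup_pyRange_one 0 _).product (PySem.List.nodup_pyRange_one 0 _)).map hinj

lemma A_canon (lines : List String) : build_sight_lines lines = (pvCanon lines).map pvFlat := by
  have hfun : (fun (d : pvD) (x : Int) =>
      (PySem.List.pyRange 0 (pvLen0 lines) 1).foldl
        (fun d y =>
          (PySem.List.pyRange 0 (lines.length : Int) 1).foldl
            (fun d z =>
              if (z, y, pvCell lines z y) ≠ (x, y, pvCell lines x y) then
                d.modify (x, y, pvCell lines x y) [] (· ++ [(z, y, pvCell lines z y)])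
              else d)
            ((PySem.List.pyRange 0 (pvLen0 lines) 1).foldl
              (fun d z =>
                if (x, z, pvCell lines x z) ≠ (x, y, pvCell lines x y) then
                  d.modify (x, y, pvCell lines x y) [] (· ++ [(x, z, pvCell lines x z)])
                else d) d)) d)
      = (fun (d : pvD) (x : Int) =>
      (PySem.List.pyRange 0 (pvLen0 lines) 1).foldl
        (fun d y => (pvRowS lines x ++ pvColS lines y).foldl (pvApp (x, y, pvCell lines x y)) d) d) := by
    funext d x
    congr 1
    funext d y
    exact pvCellStep lines x y d
  calc build_sight_lines lines
      = ((PySem.List.pyRange 0 (lines.length : Int) 1).foldl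
          (fun (d : pvD) (x : Int) =>
            (PySem.List.pyRange 0 (pvLen0 lines) 1).foldl
              (fun d y =>
                (PySem.List.pyRange 0 (lines.length : Int) 1).foldl
                  (fun d z =>
                    if (z, y, pvCell lines z y) ≠ (x, y, pvCell lines x y) then
                      d.modify (x, y, pvCell lines x y) [] (· ++ [(z, y, pvCell lines z y)])
                    else d)
                  ((PySem.List.pyRange 0 (pvLen0 lines) 1).foldl
                    (fun d z =>
                      if (x, z, pvCell lines x z) ≠ (x, y, pvCell lines x y) then
                        d.modify (x, y, pvCell lines x y) [] (· ++ [(x, z, pvCell lines x z)])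
                      else d) d)) d)
          PySem.Dict.empty).items.map (fun kv => (kv.1.1, kv.1.2.1, kv.1.2.2, kv.2)) := rfl
    _ = ((PySem.List.pyRange 0 (lines.length : Int) 1).foldl
          (fun (d : pvD) (x : Int) =>
            (PySem.List.pyRange 0 (pvLen0 lines) 1).foldl
              (fun d y => (pvRowS lines x ++ pvColS lines y).foldl (pvApp (x, y, pvCell lines x y)) d) d)
          PySem.Dict.empty).items.map (fun kv => (kv.1.1, kv.1.2.1, kv.1.2.2, kv.2)) := by
        rw [hfun]
    _ = ((pvPairs lines).foldl
          (fun (d : pvD) (p : Int × Int) =>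
            (pvRowS lines p.1 ++ pvColS lines p.2).foldl (pvApp (pvKey lines p)) d)
          PySem.Dict.empty).items.map (fun kv => (kv.1.1, kv.1.2.1, kv.1.2.2, kv.2)) := by
        exact congrArg
          (fun t : pvD => t.items.map (fun kv => (kv.1.1, kv.1.2.1, kv.1.2.2, kv.2)))
          (pvFoldlProduct (PySem.List.pyRange 0 (lines.length : Int) 1)
            (PySem.List.pyRange 0 (pvLen0 lines) 1)
            (fun (d : pvD) (p : Int × Int) =>
              (pvRowS lines p.1 ++ pvColS lines p.2).foldl (pvApp (pvKey lines p)) d)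
            PySem.Dict.empty)
    _ = (pvCanon lines).map pvFlat := by
        rw [pvDictA (pvKey lines) (fun p => pvRowS lines p.1 ++ pvColS lines p.2)
          (pvPairs lines) PySem.Dict.empty
          (fun p _ => PySem.Dict.contains_empty (pvKey lines p)) (pvKeysNodup lines)]
        have hemp : (PySem.Dict.empty : pvD).items = [] := rfl
        rw [hemp, List.nil_append]
        rfl

lemma B_canon (lines : List String) : build_sight_lines_alt lines = (pvCanon lines).map pvFlat := by
  calc build_sight_lines_alt lines
      = ((PySem.List.pyRange 0 (lines.length : Int) 1).foldl
          (fun (d : pvD) (x : Int) =>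
            (PySem.List.pyRange 0 (pvLen0 lines) 1).foldl
              (fun d y =>
                if pvNbRaw lines (x, y) ≠ [] then
                  d.insert (x, y, pvCell lines x y) (pvNbRaw lines (x, y))
                else d) d)
          PySem.Dict.empty).items.map (fun kv => (kv.1.1, kv.1.2.1, kv.1.2.2, kv.2)) := rfl
    _ = ((pvPairs lines).foldl
          (fun (d : pvD) (p : Int × Int) =>
            if pvNbRaw lines p ≠ [] then d.insert (pvKey lines p) (pvNbRaw lines p) else d)
          PySem.Dict.empty).items.map (fun kv => (kv.1.1, kv.1.2.1, kv.1.2.2, kv.2)) := by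
        exact congrArg
          (fun t : pvD => t.items.map (fun kv => (kv.1.1, kv.1.2.1, kv.1.2.2, kv.2)))
          (pvFoldlProduct (PySem.List.pyRange 0 (lines.length : Int) 1)
            (PySem.List.pyRange 0 (pvLen0 lines) 1)
            (fun (d : pvD) (p : Int × Int) =>
              if pvNbRaw lines p ≠ [] then d.insert (pvKey lines p) (pvNbRaw lines p) else d)
            PySem.Dict.empty)
    _ = (pvCanon lines).map pvFlat := by
        rw [pvDictB (pvKey lines) (pvNbRaw lines) (pvPairs lines) PySem.Dict.empty
          (fun p _ => PySem.Dict.contains_empty (pvKey lines p)) (pvKeysNodup lines)]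
        have hemp : (PySem.Dict.empty : pvD).items = [] := rfl
        rw [hemp, List.nil_append]
        rw [List.filterMap_congr (fun p hp => by rw [← pvSelEqNbRaw lines p hp])]
        rfl

theorem ports_eq (lines : List String) : build_sight_lines lines = build_sight_lines_alt lines :=
  (A_canon lines).trans (B_canon lines).symm

-- ===== VERDICT (by name: the statement is the Claim_ definition above) =====
theorem build_sight_lines_spec : Claim_equal_build_sight_lines := by
  intro lines _ _
  unfold Spec_build_sight_lines
  exact ports_eq lines
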